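-- pv_equiv track=rewrite | github.com/vaibhavwantstocode/Git | generate_demo_gif.py | colour_cmd
-- ===== SOURCE A (Python) =====
-- C = {
--     "prompt":   (63,  185, 80),
--     "cmd":      (230, 237, 243),
--     "flag":     (121, 192, 255),
--     "output":   (139, 148, 158),
--     "hash":     (246, 224, 94),
--     "branch":   (210, 168, 255),
--     "success":  (63,  185, 80),
--     "error":    (248, 81,  73),
--     "info":     (88,  166, 255),
--     "modified": (240, 136, 62),
--     "comment":  (99,  110, 123),
-- }
--
-- def colour_cmd(text: str):
--     """Very simple tokeniser: colour -flag and "quoted" parts."""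
--     tokens = []
--     i = 0
--     while i < len(text):
--         if text[i] == '-':
--             # flag — read until space
--             j = i
--             while j < len(text) and text[j] != ' ':
--                 j += 1
--             tokens.append((text[i:j], C["flag"]))
--             i = j
--         elif text[i] == '"':
--             j = text.find('"', i + 1)
--             if j == -1: j = len(text) - 1
--             tokens.append((text[i:j+1], C["flag"]))
--             i = j + 1
--         else:
--             # plain cmd text
--             j = i
--             while j < len(text) and text[j] not in ('-', '"'):
--                 j += 1
--             tokens.append((text[i:j], C["cmd"]))
--             i = j
--     return tokens
-- ===== SOURCE B (Python) =====
-- C = {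
--     "prompt":   (63,  185, 80),
--     "cmd":      (230, 237, 243),
--     "flag":     (121, 192, 255),
--     "output":   (139, 148, 158),
--     "hash":     (246, 224, 94),
--     "branch":   (210, 168, 255),
--     "success":  (63,  185, 80),
--     "error":    (248, 81,  73),
--     "info":     (88,  166, 255),
--     "modified": (240, 136, 62),
--     "comment":  (99,  110, 123),
-- }
--
-- def colour_cmd(text: str):
--     """Single-pass state machine: one fold over the characters, no index arithmetic."""
--     FLAG, CMD = C["flag"], C["cmd"]
--     tokens, mode, acc = [], None, []
--     for ch in text:
--         if mode == 'flag':
--             if ch == ' ':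
--                 tokens.append((''.join(acc), FLAG))
--                 mode, acc = 'plain', [ch]
--             else:
--                 acc.append(ch)
--         elif mode == 'quote':
--             acc.append(ch)
--             if ch == '"':
--                 tokens.append((''.join(acc), FLAG))
--                 mode, acc = None, []
--         elif mode == 'plain':
--             if ch == '-' or ch == '"':
--                 tokens.append((''.join(acc), CMD))
--                 mode, acc = ('flag' if ch == '-' else 'quote'), [ch]
--             else:
--                 acc.append(ch)
--         else:
--             mode = 'flag' if ch == '-' else 'quote' if ch == '"' else 'plain'
--             acc = [ch]
--     if acc:
--         tokens.append((''.join(acc), FLAG if mode in ('flag', 'quote') else CMD))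
--     return tokens
-- ===== Notes on version B (the rewrite author's own statement) =====
-- stated objective: alternative
-- what changed: Replaces A's index-based outer while with inner while-scans, str.find and repeated slicing by a single left-to-right fold over the characters driven by a four-state machine (none/flag/quote/plain) with a token accumulator flushed at state changes and at the end.
import Mathlib
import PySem

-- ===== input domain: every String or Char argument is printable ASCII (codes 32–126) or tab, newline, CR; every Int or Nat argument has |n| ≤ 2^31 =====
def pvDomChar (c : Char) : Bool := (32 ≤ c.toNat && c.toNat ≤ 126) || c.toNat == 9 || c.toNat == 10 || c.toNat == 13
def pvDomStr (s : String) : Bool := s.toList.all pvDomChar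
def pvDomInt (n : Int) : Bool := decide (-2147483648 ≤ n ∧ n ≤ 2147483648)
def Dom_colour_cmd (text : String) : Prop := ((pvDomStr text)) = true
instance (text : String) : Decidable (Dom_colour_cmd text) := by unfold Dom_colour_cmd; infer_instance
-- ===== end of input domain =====

-- B replaces A's index-and-slice scanning (outer while + inner while loops + str.find)
-- with a single left-to-right fold over the characters driven by a 4-state machine
-- (objective: alternative — one uniform pass, no index arithmetic).


-- module constants C["flag"], C["cmd"] (the only two colours the function uses)
def pvCFlag : Int × Int × Int := (121, 192, 255)
def pvCCmd : Int × Int × Int := (230, 237, 243)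

-- ===== PORT A =====
-- A's loop state is the index i; the port carries the suffix text[i:] as a list.
-- inner `while j < len and <text[j] keeps p>: j += 1` → length of the scanned run
def pvWhileCount (p : Char → Bool) : List Char → Nat
  | [] => 0
  | c :: rest => if p c then pvWhileCount p rest + 1 else 0

-- text.find('"', i+1), offset relative to i+1 (none = Python's -1)
def pvFindQ : List Char → Option Nat
  | [] => none
  | c :: rest => if c = '"' then some 0 else (pvFindQ rest).map (· + 1)

def pvGoA : List Char → List (String × (Int × Int × Int))
  | [] => []
  | c :: rest =>
    if c = '-' then
      -- text[i] = '-' ≠ ' ', so the inner while runs over rest; slice text[i:j]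
      let j := pvWhileCount (fun ch => ch != ' ') rest
      (String.ofList (c :: rest.take j), pvCFlag) :: pvGoA (rest.drop j)
    else if c = '"' then
      match pvFindQ rest with
      | some k => (String.ofList (c :: rest.take (k + 1)), pvCFlag) :: pvGoA (rest.drop (k + 1))
      | none => [(String.ofList (c :: rest), pvCFlag)]   -- j = len-1: token = text[i:], then i = len
    else
      let j := pvWhileCount (fun ch => ch != '-' && ch != '"') rest
      (String.ofList (c :: rest.take j), pvCCmd) :: pvGoA (rest.drop j)
termination_by l => l.length
decreasing_by
  all_goals simp [List.length_drop]

def colour_cmd (text : String) : List (String × (Int × Int × Int)) :=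
  pvGoA text.toList

-- ===== PORT B =====
inductive PvMode where
  | mnone | mflag | mquote | mplain
deriving DecidableEq, Repr

def pvStep : (List (String × (Int × Int × Int)) × PvMode × List Char) → Char →
    (List (String × (Int × Int × Int)) × PvMode × List Char)
  | (toks, PvMode.mflag, acc), ch =>
      if ch = ' ' then (toks ++ [(String.ofList acc, pvCFlag)], PvMode.mplain, [ch])
      else (toks, PvMode.mflag, acc ++ [ch])
  | (toks, PvMode.mquote, acc), ch =>
      if ch = '"' then (toks ++ [(String.ofList (acc ++ [ch]), pvCFlag)], PvMode.mnone, [])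
      else (toks, PvMode.mquote, acc ++ [ch])
  | (toks, PvMode.mplain, acc), ch =>
      if ch = '-' then (toks ++ [(String.ofList acc, pvCCmd)], PvMode.mflag, [ch])
      else if ch = '"' then (toks ++ [(String.ofList acc, pvCCmd)], PvMode.mquote, [ch])
      else (toks, PvMode.mplain, acc ++ [ch])
  | (toks, PvMode.mnone, _), ch =>
      (toks, if ch = '-' then PvMode.mflag else if ch = '"' then PvMode.mquote else PvMode.mplain, [ch])

def pvFlush : (List (String × (Int × Int × Int)) × PvMode × List Char) →
    List (String × (Int × Int × Int))
  | (toks, mode, acc) =>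
      if acc = [] then toks
      else toks ++ [(String.ofList acc,
        if mode = PvMode.mflag ∨ mode = PvMode.mquote then pvCFlag else pvCCmd)]

def colour_cmd_alt (text : String) : List (String × (Int × Int × Int)) :=
  pvFlush (text.toList.foldl pvStep ([], PvMode.mnone, []))

-- ===== PRECONDITION & SPEC =====
def Spec_colour_cmd (text : String) (out : List (String × (Int × Int × Int))) : Prop := out = colour_cmd_alt text
instance (text : String) (out : List (String × (Int × Int × Int))) : Decidable (Spec_colour_cmd text out) := by unfold Spec_colour_cmd; infer_instance

-- ===== CLAIM (what is proved, stated in full; the proofs are below) =====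
def Claim_equal_colour_cmd : Prop := ∀ (text : String), Dom_colour_cmd text → Spec_colour_cmd text (colour_cmd text)

-- ===== LEMMAS AND PROOFS =====

lemma pv_take_whileCount (p : Char → Bool) (l : List Char) :
    l.take (pvWhileCount p l) = l.takeWhile p := by
  induction l with
  | nil => rfl
  | cons c rest ih =>
    by_cases h : p c <;> simp [pvWhileCount, List.takeWhile, h, ih]

lemma pv_drop_whileCount (p : Char → Bool) (l : List Char) :
    l.drop (pvWhileCount p l) = l.dropWhile p := by
  induction l with
  | nil => rfl
  | cons c rest ih =>
    by_cases h : p c <;> simp [pvWhileCount, List.dropWhile, h, ih]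

lemma pvGoA_dash (rest : List Char) :
    pvGoA ('-' :: rest) =
      (String.ofList ('-' :: rest.takeWhile (fun ch => ch != ' ')), pvCFlag) ::
        pvGoA (rest.dropWhile (fun ch => ch != ' ')) := by
  rw [pvGoA]
  simp [pv_take_whileCount, pv_drop_whileCount]

lemma pvGoA_quote (rest : List Char) :
    pvGoA ('"' :: rest) =
      (match pvFindQ rest with
       | some k => (String.ofList ('"' :: rest.take (k + 1)), pvCFlag) :: pvGoA (rest.drop (k + 1))
       | none => [(String.ofList ('"' :: rest), pvCFlag)]) := by
  rw [pvGoA]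
  simp

lemma pvGoA_plain (c : Char) (rest : List Char) (h1 : c ≠ '-') (h2 : c ≠ '"') :
    pvGoA (c :: rest) =
      (String.ofList (c :: rest.takeWhile (fun ch => ch != '-' && ch != '"')), pvCCmd) ::
        pvGoA (rest.dropWhile (fun ch => ch != '-' && ch != '"')) := by
  rw [pvGoA]
  simp [h1, h2, pv_take_whileCount, pv_drop_whileCount]

-- joint invariant of B's fold, one conjunct per machine state
lemma pvRun (l : List Char) :
    (∀ toks, pvFlush (l.foldl pvStep (toks, PvMode.mnone, [])) = toks ++ pvGoA l) ∧
    (∀ toks acc, acc ≠ [] →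
      pvFlush (l.foldl pvStep (toks, PvMode.mflag, acc)) =
        toks ++ (String.ofList (acc ++ l.takeWhile (fun ch => ch != ' ')), pvCFlag) ::
          pvGoA (l.dropWhile (fun ch => ch != ' '))) ∧
    (∀ toks acc, acc ≠ [] →
      pvFlush (l.foldl pvStep (toks, PvMode.mquote, acc)) =
        toks ++ (match pvFindQ l with
                 | some k => (String.ofList (acc ++ l.take (k + 1)), pvCFlag) :: pvGoA (l.drop (k + 1))
                 | none => [(String.ofList (acc ++ l), pvCFlag)])) ∧
    (∀ toks acc, acc ≠ [] →
      pvFlush (l.foldl pvStep (toks, PvMode.mplain, acc)) =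
        toks ++ (String.ofList (acc ++ l.takeWhile (fun ch => ch != '-' && ch != '"')), pvCCmd) ::
          pvGoA (l.dropWhile (fun ch => ch != '-' && ch != '"'))) := by
  induction l with
  | nil =>
    refine ⟨?_, ?_, ?_, ?_⟩ <;> intros <;>
      simp_all [pvFlush, pvGoA, pvFindQ, List.foldl]
  | cons c rest ih =>
    obtain ⟨ihn, ihf, ihq, ihp⟩ := ih
    refine ⟨?_, ?_, ?_, ?_⟩
    · -- mnone
      intro toks
      by_cases h1 : c = '-'
      · subst h1
        simp only [List.foldl, pvStep, Char.reduceEq, ite_true, ite_false]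
        rw [ihf toks ['-'] (by simp), pvGoA_dash]
        simp
      · by_cases h2 : c = '"'
        · subst h2
          simp only [List.foldl, pvStep, Char.reduceEq, ite_true, ite_false]
          rw [ihq toks ['"'] (by simp), pvGoA_quote]
          cases hfq : pvFindQ rest <;> simp_all
        · simp only [List.foldl, pvStep, if_neg h1, if_neg h2]
          rw [ihp toks [c] (by simp), pvGoA_plain c rest h1 h2]
          simp
    · -- mflag
      intro toks acc hacc
      by_cases h : c = ' '
      · subst h
        simp only [List.foldl, pvStep, ite_true]
        rw [ihp _ [' '] (by simp)]
        rw [List.takeWhile_cons, List.dropWhile_cons]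
        simp only [show (' ' != ' ') = false from rfl, Bool.false_eq_true, if_false]
        rw [pvGoA_plain ' ' rest (by decide) (by decide)]
        simp
      · simp only [List.foldl, pvStep, if_neg h]
        rw [ihf _ (acc ++ [c]) (by simp)]
        rw [List.takeWhile_cons, List.dropWhile_cons]
        simp [h]
    · -- mquote
      intro toks acc hacc
      by_cases h : c = '"'
      · subst h
        simp only [List.foldl, pvStep, ite_true]
        rw [ihn]
        simp [pvFindQ]
      · simp only [List.foldl, pvStep, if_neg h]
        rw [ihq _ (acc ++ [c]) (by simp)]
        simp only [pvFindQ, if_neg h]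
        cases hfq : pvFindQ rest <;> simp_all
    · -- mplain
      intro toks acc hacc
      by_cases h1 : c = '-'
      · subst h1
        simp only [List.foldl, pvStep, Char.reduceEq, ite_true, ite_false]
        rw [ihf _ ['-'] (by simp)]
        rw [List.takeWhile_cons, List.dropWhile_cons]
        simp [pvGoA_dash]
      · by_cases h2 : c = '"'
        · subst h2
          simp only [List.foldl, pvStep, Char.reduceEq, ite_true, ite_false]
          rw [ihq _ ['"'] (by simp)]
          rw [List.takeWhile_cons, List.dropWhile_cons]
          cases hfq : pvFindQ rest <;> simp [hfq, pvGoA_quote]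
        · simp only [List.foldl, pvStep, if_neg h1, if_neg h2]
          rw [ihp _ (acc ++ [c]) (by simp)]
          rw [List.takeWhile_cons, List.dropWhile_cons]
          simp [h1, h2]

-- ===== VERDICT (by name: the statement is the Claim_ definition above) =====
theorem colour_cmd_spec : Claim_equal_colour_cmd := by
  intro text _
  unfold Spec_colour_cmd colour_cmd colour_cmd_alt
  rw [(pvRun text.toList).1 []]
  simp
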